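-- pv_equiv track=rewrite | github.com/inchichi/rl-pika | _30_src/train.py | parse_curriculum_schedule
-- ===== SOURCE A (Python) =====
-- def parse_curriculum_schedule(value, default_spec="rule"):
--     schedule_text = str(value or "").strip()
--     if schedule_text == "":
--         base_spec = str(default_spec or "rule").strip() or "rule"
--         return [(0, base_spec)]
--
--     schedule = []
--     for chunk in schedule_text.split(","):
--         entry = chunk.strip()
--         if entry == "":
--             continue
--         start_text, sep, opponent_spec = entry.partition("=")
--         if sep == "":
--             start_episode = 0
--             opponent_spec = start_text
--         else:
--             try:
--                 start_episode = int(start_text.strip())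
--             except ValueError:
--                 continue
--         opponent_spec = str(opponent_spec).strip()
--         if opponent_spec == "":
--             continue
--         schedule.append((max(0, int(start_episode)), opponent_spec))
--
--     if not schedule:
--         base_spec = str(default_spec or "rule").strip() or "rule"
--         return [(0, base_spec)]
--
--     schedule.sort(key=lambda item: item[0])
--     if schedule[0][0] != 0:
--         base_spec = str(default_spec or "rule").strip() or "rule"
--         schedule.insert(0, (0, base_spec))
--
--     deduplicated_schedule = []
--     for start_episode, opponent_spec in schedule:
--         if deduplicated_schedule and deduplicated_schedule[-1][0] == start_episode:
--             deduplicated_schedule[-1] = (start_episode, opponent_spec)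
--         else:
--             deduplicated_schedule.append((start_episode, opponent_spec))
--     return deduplicated_schedule
-- ===== SOURCE B (Python) =====
-- def parse_curriculum_schedule(value, default_spec="rule"):
--     # Single pass: accumulate last-wins into a dict keyed by start episode,
--     # then sort once; replaces A's sort + front-insert + adjacent-dedup passes.
--     entries = {}
--     for chunk in str(value or "").strip().split(","):
--         entry = chunk.strip()
--         if entry == "":
--             continue
--         start_text, sep, opponent_spec = entry.partition("=")
--         if sep == "":
--             start_episode = 0
--             opponent_spec = start_text
--         else:
--             try:
--                 start_episode = int(start_text.strip())
--             except ValueError: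
--                 continue
--         opponent_spec = str(opponent_spec).strip()
--         if opponent_spec == "":
--             continue
--         entries[max(0, int(start_episode))] = opponent_spec
--     if not entries:
--         return [(0, str(default_spec or "rule").strip() or "rule")]
--     if 0 not in entries:
--         entries[0] = str(default_spec or "rule").strip() or "rule"
--     return sorted(entries.items(), key=lambda item: item[0])
-- ===== Notes on version B (the rewrite author's own statement) =====
-- stated objective: simpler
-- what changed: The parse loop accumulates last-wins into a dict keyed by start episode, so A's separate sort, front-insertion of the default and adjacent-duplicate-elimination passes collapse into one dict build plus a single sort of the distinct items.
import Mathlib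
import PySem

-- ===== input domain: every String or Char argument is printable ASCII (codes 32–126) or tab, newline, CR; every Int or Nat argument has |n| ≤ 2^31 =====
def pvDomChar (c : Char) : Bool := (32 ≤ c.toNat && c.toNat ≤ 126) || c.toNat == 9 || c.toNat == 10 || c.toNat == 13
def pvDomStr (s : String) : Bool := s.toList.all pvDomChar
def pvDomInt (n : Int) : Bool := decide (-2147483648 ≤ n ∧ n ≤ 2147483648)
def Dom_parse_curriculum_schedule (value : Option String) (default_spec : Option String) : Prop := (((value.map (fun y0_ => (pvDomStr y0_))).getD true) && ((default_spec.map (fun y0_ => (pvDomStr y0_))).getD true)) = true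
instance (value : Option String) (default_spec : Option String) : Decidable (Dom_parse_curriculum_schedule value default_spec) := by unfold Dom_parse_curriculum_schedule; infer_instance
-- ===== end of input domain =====

-- B replaces A's sort + front-insert + adjacent-dedup passes by a last-wins dict built in the
-- parse pass, then one sort of the distinct items. Equivalence of the return values is proved below.

-- ===== PORT A =====
-- str(default_spec or "rule").strip() or "rule"   (shared by both Pythons verbatim)
def pcsBase (default_spec : Option String) : String :=
  let d0 := default_spec.getD ""
  let d1 := if d0 = "" then "rule" else d0
  let b := PySem.Str.strip d1
  if b = "" then "rule" else b

-- the per-chunk parsing both Pythons share verbatim: strip, skip empties, partition on the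
-- first '=' (ported exactly via find of '='), int() via PySem.Int.ofChars?, strip the spec
def pcsEntry? (chunk : List Char) : Option (Int × String) :=
  let entry := PySem.Chars.strip chunk
  if entry = [] then none
  else
    let i := PySem.Chars.find entry ['=']
    if i = -1 then
      let opponent := PySem.Chars.strip entry
      if opponent = [] then none else some (0, String.ofList opponent)
    else
      match PySem.Int.ofChars? (PySem.Chars.strip (entry.take i.toNat)) with
      | none => none
      | some n =>
        let opponent := PySem.Chars.strip (entry.drop (i.toNat + 1))
        if opponent = [] then none else some (max 0 n, String.ofList opponent)

def parse_curriculum_schedule (value : Option String) (default_spec : Option String) : List (Int × String) :=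
  let schedule_text := PySem.Chars.strip (value.getD "").toList
  if schedule_text = [] then [(0, pcsBase default_spec)]
  else
    let schedule := (PySem.Chars.splitOn schedule_text [',']).foldl
      (fun acc c => match pcsEntry? c with | none => acc | some p => acc ++ [p]) []
    if schedule = [] then [(0, pcsBase default_spec)]
    else
      let schedule := PySem.List.sorted schedule (fun p => p.1) false
      let schedule := if (PySem.List.pyGetD schedule 0 (0, "")).1 ≠ 0 then
          (0, pcsBase default_spec) :: schedule else schedule
      schedule.foldl (fun acc p =>
        if acc ≠ [] ∧ (PySem.List.pyGetD acc (-1) (0, "")).1 = p.1 then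
          PySem.List.pySetD acc (-1) p
        else acc ++ [p]) []

-- ===== PORT B =====
def parse_curriculum_schedule_alt (value : Option String) (default_spec : Option String) : List (Int × String) :=
  let entries : PySem.Dict Int String :=
    (PySem.Chars.splitOn (PySem.Chars.strip (value.getD "").toList) [',']).foldl
      (fun d c => match pcsEntry? c with | none => d | some p => d.insert p.1 p.2)
      PySem.Dict.empty
  if entries.items = [] then [(0, pcsBase default_spec)]
  else
    let entries := if entries.contains 0 then entries
      else entries.insert 0 (pcsBase default_spec)
    PySem.List.sorted entries.items (fun p => p.1) false

-- ===== PRECONDITION & SPEC =====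
def Spec_parse_curriculum_schedule (value : Option String) (default_spec : Option String) (out : List (Int × String)) : Prop := out = parse_curriculum_schedule_alt value default_spec
instance (value : Option String) (default_spec : Option String) (out : List (Int × String)) : Decidable (Spec_parse_curriculum_schedule value default_spec out) := by unfold Spec_parse_curriculum_schedule; infer_instance

-- ===== CLAIM (what is proved, stated in full; the proofs are below) =====
def Claim_equal_parse_curriculum_schedule : Prop := ∀ (value : Option String) (default_spec : Option String), Dom_parse_curriculum_schedule value default_spec → Spec_parse_curriculum_schedule value default_spec (parse_curriculum_schedule value default_spec)

-- ===== LEMMAS AND PROOFS =====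

-- the parsed entries (proof-side abbreviation)
def pcsLastv (l : List (Int × String)) (k : Int) : String :=
  (((l.filter (fun p => p.1 == k)).map Prod.snd).getLast?).getD ""

def pcsCanon (l : List (Int × String)) : List (Int × String) :=
  (PySem.Set.ofList (l.map Prod.fst)).map (fun k => (k, pcsLastv l k))

theorem pcs_foldl_match {γ : Type} (l : List (List Char)) (g : γ → Int × String → γ) (a : γ) :
    l.foldl (fun a c => match pcsEntry? c with | none => a | some p => g a p) a
      = (l.filterMap pcsEntry?).foldl g a := by
  induction l generalizing a with
  | nil => rfl
  | cons c t ih => cases h : pcsEntry? c <;> simp [h, ih]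

theorem pcs_entry_nonneg (c : List Char) (p : Int × String) (h : pcsEntry? c = some p) :
    0 ≤ p.1 := by
  obtain ⟨a, b⟩ := p
  simp only [pcsEntry?] at h
  split_ifs at h with h1 h2 h3
  all_goals (
    first
      | (simp at h; omega)
      | (rcases hm : PySem.Int.ofChars? (PySem.Chars.strip (List.take (PySem.Chars.find (PySem.Chars.strip c) ['=']).toNat (PySem.Chars.strip c))) with _ | n <;>
          rw [hm] at h <;> simp at h <;> omega))

theorem pcs_getD_dfold (es : List (Int × String)) (k : Int) :
    ((es.foldl (fun d (p : Int × String) => d.insert p.1 p.2) PySem.Dict.empty).getD k "")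
      = pcsLastv es k := by
  induction es using List.reverseRecOn with
  | nil => simp [pcsLastv, PySem.Dict.getD_empty]
  | append_singleton es p ih =>
    rw [List.foldl_append]
    simp only [List.foldl_cons, List.foldl_nil]
    rw [PySem.Dict.getD_insert]
    by_cases hk : k = p.1
    · subst hk
      simp [pcsLastv, List.filter_append]
    · rw [if_neg hk, ih]
      simp [pcsLastv, List.filter_append, Ne.symm hk]

theorem pcs_keys_dfold (es : List (Int × String)) :
    ((es.foldl (fun d (p : Int × String) => d.insert p.1 p.2) PySem.Dict.empty).keys)
      = PySem.Set.ofList (es.map Prod.fst) := by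
  have h := PySem.Dict.keys_foldl_insert_key (ν := String) es Prod.fst (fun _ p => p.2) PySem.Dict.empty
  simpa [PySem.Dict.keys_empty, PySem.Set.update_empty] using h

theorem pcs_nodup_keys_dfold (es : List (Int × String)) :
    ((es.foldl (fun d (p : Int × String) => d.insert p.1 p.2) PySem.Dict.empty).keys).Nodup := by
  have h := PySem.Dict.nodup_keys_foldl_insert_key (ν := String) es Prod.fst (fun _ p => p.2) PySem.Dict.empty
  simp [PySem.Dict.keys_empty] at h
  exact h

theorem pcs_filter_insertBy (ys : List (Int × String)) (x : Int × String) (c : Int)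
    (hs : ys.Pairwise (fun a b => a.1 ≤ b.1)) :
    (PySem.List.insertBy (fun a b => decide (a.1 < b.1)) x ys).filter (fun p => p.1 == c)
      = if x.1 == c then ys.filter (fun p => p.1 == c) ++ [x]
        else ys.filter (fun p => p.1 == c) := by
  induction ys with
  | nil => by_cases h : x.1 = c <;> simp [PySem.List.insertBy, h]
  | cons y t ih =>
    rw [List.pairwise_cons] at hs
    obtain ⟨hy, ht⟩ := hs
    by_cases hlt : x.1 < y.1
    · have hins : PySem.List.insertBy (fun a b => decide (a.1 < b.1)) x (y :: t) = x :: y :: t := by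
        simp [PySem.List.insertBy, hlt]
      rw [hins]
      by_cases hxc : x.1 = c
      · have hnil : (y :: t).filter (fun p => p.1 == c) = [] := by
          rw [List.filter_eq_nil_iff]
          intro z hz
          have : y.1 ≤ z.1 := by
            rcases List.mem_cons.mp hz with rfl | hz'
            · exact le_refl _
            · exact hy z hz'
          simp only [beq_iff_eq]
          omega
        simp [hxc, hnil]
      · simp [hxc, List.filter_cons]
    · have hins : PySem.List.insertBy (fun a b => decide (a.1 < b.1)) x (y :: t)
          = y :: PySem.List.insertBy (fun a b => decide (a.1 < b.1)) x t := by
        simp [PySem.List.insertBy, hlt]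
      rw [hins, List.filter_cons, ih ht]
      by_cases hxc : x.1 = c <;> by_cases hyc : y.1 = c <;> simp [hxc, hyc]

theorem pcs_filter_sorted (l : List (Int × String)) (c : Int) :
    (PySem.List.sorted l (fun p => p.1)).filter (fun p => p.1 == c)
      = l.filter (fun p => p.1 == c) := by
  induction l using List.reverseRecOn with
  | nil => simp [PySem.List.sorted_eq_foldl_insertBy]
  | append_singleton t x ih =>
    have hfold : PySem.List.sorted (t ++ [x]) (fun p => (p : Int × String).1)
        = PySem.List.insertBy (fun a b => decide (a.1 < b.1)) x (PySem.List.sorted t (fun p => p.1)) := by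
      rw [PySem.List.sorted_eq_foldl_insertBy, PySem.List.sorted_eq_foldl_insertBy, List.foldl_append,
        List.foldl_cons, List.foldl_nil]
    rw [hfold, pcs_filter_insertBy _ _ _ (PySem.List.sorted_pairwise t (fun p => p.1)), ih,
      List.filter_append]
    by_cases h : x.1 = c <;> simp [h]

theorem pcs_lastv_append (l : List (Int × String)) (p : Int × String) (k : Int) :
    pcsLastv (l ++ [p]) k = if p.1 == k then p.2 else pcsLastv l k := by
  by_cases h : p.1 = k <;> simp [pcsLastv, List.filter_append, h]

theorem pcs_getLast_sorted_max (ks : List Int) (hs : ks.Pairwise (· ≤ ·)) (x : Int)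
    (hx : x ∈ ks) (hb : ∀ y ∈ ks, y ≤ x) : ks.getLast? = some x := by
  induction ks with
  | nil => simp at hx
  | cons a t ih =>
    rw [List.pairwise_cons] at hs
    obtain ⟨ha, ht⟩ := hs
    cases t with
    | nil => simp at hx ⊢; omega
    | cons b u =>
      rw [List.getLast?_cons_cons]
      by_cases hxt : x ∈ b :: u
      · exact ih ht hxt (fun y hy => hb y (List.mem_cons_of_mem _ hy))
      · rcases List.mem_cons.mp hx with rfl | h'
        · exfalso
          have h1 : x ≤ b := ha b (by simp)
          have h2 : b ≤ x := hb b (by simp)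
          have hbx : b = x := le_antisymm h2 h1
          exact hxt (by simp [hbx])
        · exact absurd h' hxt

theorem pcs_getLast_ofList (ks : List Int) (hs : ks.Pairwise (· ≤ ·)) :
    (PySem.Set.ofList ks).getLast? = ks.getLast? := by
  induction ks using List.reverseRecOn with
  | nil => simp [PySem.Set.ofList]
  | append_singleton t k ih =>
    rw [List.pairwise_append] at hs
    obtain ⟨ht, -, hb⟩ := hs
    rw [PySem.Set.ofList_append_singleton, PySem.Set.add_eq_ite]
    by_cases hk : k ∈ PySem.Set.ofList t
    · rw [if_pos hk, ih ht]
      rw [List.getLast?_concat]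
      exact pcs_getLast_sorted_max t ht k ((PySem.Set.mem_ofList t k).mp hk)
        (fun y hy => hb y hy k (by simp))
    · rw [if_neg hk]
      simp

theorem pcs_sublist_ofList {α : Type} [BEq α] [LawfulBEq α] (ks : List α) :
    (PySem.Set.ofList ks).Sublist ks := by
  induction ks using List.reverseRecOn with
  | nil => simp [PySem.Set.ofList]
  | append_singleton t k ih =>
    rw [PySem.Set.ofList_append_singleton, PySem.Set.add_eq_ite]
    by_cases hk : k ∈ PySem.Set.ofList t
    · exact (if_pos hk ▸ ih.trans (List.sublist_append_left t [k]))
    · rw [if_neg hk]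
      exact ih.append (List.Sublist.refl [k])

theorem pcs_pairwise_ofList (ks : List Int) (hs : ks.Pairwise (· ≤ ·)) :
    (PySem.Set.ofList ks).Pairwise (· < ·) := by
  have h1 : (PySem.Set.ofList ks).Pairwise (· ≤ ·) := hs.sublist (pcs_sublist_ofList ks)
  have h2 : (PySem.Set.ofList ks).Pairwise (· ≠ ·) := PySem.Set.nodup_ofList ks
  exact (h1.and h2).imp (fun h => lt_of_le_of_ne h.1 h.2)

theorem pcs_pySetD_neg_one {α : Type} (xs : List α) (v : α) (h : xs ≠ []) :
    PySem.List.pySetD xs (-1) v = xs.dropLast ++ [v] := by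
  have hlen : 0 < xs.length := List.length_pos_iff.mpr h
  have hidx : PySem.List.pyIdx? xs.length (-1) = some (xs.length - 1) := by
    simp only [PySem.List.pyIdx?]
    rw [if_neg (by omega), if_pos (by omega)]
    norm_num
  simp only [PySem.List.pySetD, PySem.List.pySet?, hidx, Option.map_some, Option.getD_some]
  rw [List.set_eq_take_append_cons_drop, if_pos (by omega), List.dropLast_eq_take,
    List.drop_eq_nil_of_le (by omega)]

theorem pcs_mem_of_getLast? {α : Type} {l : List α} {a : α} (h : l.getLast? = some a) :
    a ∈ l := by
  obtain ⟨t, rfl⟩ := List.getLast?_eq_some_iff.mp h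
  simp

theorem pcs_canon_eq (l : List (Int × String)) (hs : l.Pairwise (fun a b => a.1 ≤ b.1)) :
    l.foldl (fun acc p =>
        if acc ≠ [] ∧ (PySem.List.pyGetD acc (-1) (0, "")).1 = p.1 then
          PySem.List.pySetD acc (-1) p
        else acc ++ [p]) []
      = pcsCanon l := by
  induction l using List.reverseRecOn with
  | nil => rfl
  | append_singleton l p ih =>
    rw [List.foldl_append, List.foldl_cons, List.foldl_nil]
    have hsplit := List.pairwise_append.mp hs
    have hsl : l.Pairwise (fun a b => a.1 ≤ b.1) := hsplit.1
    have hb : ∀ q ∈ l, q.1 ≤ p.1 := fun q hq => hsplit.2.2 q hq p (by simp)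
    rw [ih hsl]
    have hkpw : (l.map Prod.fst).Pairwise (· ≤ ·) := List.pairwise_map.mpr hsl
    by_cases hl : l = []
    · subst hl
      simp [pcsCanon, pcsLastv, PySem.Set.ofList_cons, PySem.Set.discard]
    · have hksne : l.map Prod.fst ≠ [] := by simpa using hl
      obtain ⟨k0, hk0⟩ : ∃ k0, (l.map Prod.fst).getLast? = some k0 :=
        Option.isSome_iff_exists.mp (List.getLast?_isSome.mpr hksne)
      have hcne : pcsCanon l ≠ [] := by
        simp only [pcsCanon, ne_eq, List.map_eq_nil_iff]
        intro hC
        have : k0 ∈ PySem.Set.ofList (l.map Prod.fst) :=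
          (PySem.Set.mem_ofList _ _).mpr (pcs_mem_of_getLast? hk0)
        simp [hC] at this
      have hclast : (pcsCanon l).getLast? = some (k0, pcsLastv l k0) := by
        rw [pcsCanon, List.getLast?_map, pcs_getLast_ofList _ hkpw, hk0, Option.map_some]
      have hgd : (PySem.List.pyGetD (pcsCanon l) (-1) (0, "")).1 = k0 := by
        rw [PySem.List.pyGetD_neg_one (pcsCanon l) (0, "") hcne]
        rw [List.getLast?_eq_some_getLast hcne] at hclast
        simp only [Option.some_inj] at hclast
        rw [hclast]
      have hk0mem : k0 ∈ l.map Prod.fst := pcs_mem_of_getLast? hk0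
      have hkb : ∀ y ∈ l.map Prod.fst, y ≤ p.1 := by
        intro y hy
        obtain ⟨q, hq, rfl⟩ := List.mem_map.mp hy
        exact hb q hq
      by_cases hkp : k0 = p.1
      · rw [if_pos ⟨hcne, by rw [hgd]; exact hkp⟩, pcs_pySetD_neg_one _ _ hcne]
        have hmem : p.1 ∈ PySem.Set.ofList (l.map Prod.fst) :=
          (PySem.Set.mem_ofList _ _).mpr (hkp ▸ hk0mem)
        have hkeys : PySem.Set.ofList ((l ++ [p]).map Prod.fst)
            = PySem.Set.ofList (l.map Prod.fst) := by
          rw [List.map_append, List.map_singleton, PySem.Set.ofList_append_singleton,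
            PySem.Set.add_eq_ite, if_pos hmem]
        have hofLast : (PySem.Set.ofList (l.map Prod.fst)).getLast? = some p.1 := by
          rw [pcs_getLast_ofList _ hkpw, hk0, hkp]
        obtain ⟨init, hinit⟩ := List.getLast?_eq_some_iff.mp hofLast
        have hnd : p.1 ∉ init := by
          have := PySem.Set.nodup_ofList (l.map Prod.fst)
          rw [hinit] at this
          intro hmem
          exact (List.nodup_append.mp this).2.2 p.1 hmem p.1 (List.mem_singleton.mpr rfl) rfl
        simp only [pcsCanon]
        rw [hkeys, hinit]
        simp only [List.map_append, List.map_cons, List.map_nil]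
        rw [List.dropLast_concat]
        congr 1
        · apply List.map_congr_left
          intro k hk
          have hkne : k ≠ p.1 := fun hkeq => hnd (hkeq ▸ hk)
          rw [pcs_lastv_append]
          rw [if_neg (by simpa using fun hh => hkne hh.symm)]
        · rw [pcs_lastv_append, if_pos (by simp)]
      · have hnotmem : p.1 ∉ PySem.Set.ofList (l.map Prod.fst) := by
          intro hmem
          have := pcs_getLast_sorted_max _ hkpw p.1 ((PySem.Set.mem_ofList _ _).mp hmem) hkb
          rw [hk0] at this
          exact hkp (Option.some_inj.mp this)
        rw [if_neg (by rintro ⟨-, hc⟩; rw [hgd] at hc; exact hkp hc)]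
        have hkeys : PySem.Set.ofList ((l ++ [p]).map Prod.fst)
            = PySem.Set.ofList (l.map Prod.fst) ++ [p.1] := by
          rw [List.map_append, List.map_singleton, PySem.Set.ofList_append_singleton,
            PySem.Set.add_eq_ite, if_neg hnotmem]
        simp only [pcsCanon]
        rw [hkeys, List.map_append, List.map_singleton]
        congr 1
        · apply List.map_congr_left
          intro k hk
          have hkne : k ≠ p.1 := fun hkeq => hnotmem (hkeq ▸ hk)
          rw [pcs_lastv_append, if_neg (by simpa using fun hh => hkne hh.symm)]
        · rw [pcs_lastv_append, if_pos (by simp)]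

theorem pcs_lastv_sorted (l : List (Int × String)) (k : Int) :
    pcsLastv (PySem.List.sorted l (fun p => p.1)) k = pcsLastv l k := by
  unfold pcsLastv
  rw [pcs_filter_sorted]

theorem pcs_main (value default_spec : Option String) :
    parse_curriculum_schedule value default_spec = parse_curriculum_schedule_alt value default_spec := by
  unfold parse_curriculum_schedule parse_curriculum_schedule_alt
  simp only [pcs_foldl_match, PySem.List.foldl_append_singleton_eq_self, List.nil_append]
  set st := PySem.Chars.strip (value.getD "").toList with hst_def
  set base := pcsBase default_spec with hbase_def
  set es := List.filterMap pcsEntry? (PySem.Chars.splitOn st [',']) with hes_def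
  set D := List.foldl (fun (a : PySem.Dict Int String) (p : Int × String) => a.insert p.1 p.2)
      PySem.Dict.empty es with hD_def
  by_cases h1 : st = []
  · rw [if_pos h1]
    have hnil : es = [] := by rw [hes_def, h1]; rfl
    have hDempty : D = PySem.Dict.empty := by rw [hD_def, hnil]; rfl
    rw [hDempty]
    rfl
  · rw [if_neg h1]
    by_cases h2 : es = []
    · rw [if_pos h2]
      have hDempty : D = PySem.Dict.empty := by rw [hD_def, h2]; rfl
      rw [hDempty]
      rfl
    · rw [if_neg h2]
      -- shared dictionary facts
      have hkeys : D.keys = PySem.Set.ofList (es.map Prod.fst) := pcs_keys_dfold es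
      have hnd : D.keys.Nodup := pcs_nodup_keys_dfold es
      have hitems : D.items = (PySem.Set.ofList (es.map Prod.fst)).map
          (fun k => (k, pcsLastv es k)) := by
        rw [PySem.Dict.items_eq_map_keys D hnd "", hkeys]
        exact List.map_congr_left (fun k _ => by rw [pcs_getD_dfold es k])
      have hesne : ∃ q, q ∈ es := List.exists_mem_of_ne_nil es h2
      obtain ⟨q, hq⟩ := hesne
      have hitemsne : D.items ≠ [] := by
        rw [hitems]
        intro hC
        rw [List.map_eq_nil_iff] at hC
        have : q.1 ∈ PySem.Set.ofList (es.map Prod.fst) :=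
          (PySem.Set.mem_ofList _ _).mpr (List.mem_map_of_mem hq)
        simp [hC] at this
      rw [if_neg hitemsne]
      set ss := PySem.List.sorted es (fun p => p.1) with hss_def
      have hssp : ss.Pairwise (fun a b => a.1 ≤ b.1) := PySem.List.sorted_pairwise es (fun p => p.1)
      have hnn : ∀ p ∈ es, 0 ≤ p.1 := by
        intro p hp
        obtain ⟨c, -, hc⟩ := List.mem_filterMap.mp hp
        exact pcs_entry_nonneg c p hc
      have hssne : ss ≠ [] := by
        rw [hss_def, Ne, PySem.List.sorted_eq_nil_iff]
        exact h2
      have hkssperm : (ss.map Prod.fst).Perm (es.map Prod.fst) :=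
        (PySem.List.sorted_perm es (fun p => p.1) false).map Prod.fst
      have hofperm : (PySem.Set.ofList (ss.map Prod.fst)).Perm
          (PySem.Set.ofList (es.map Prod.fst)) := by
        refine (List.perm_ext_iff_of_nodup (PySem.Set.nodup_ofList _) (PySem.Set.nodup_ofList _)).mpr ?_
        intro k
        rw [PySem.Set.mem_ofList, PySem.Set.mem_ofList]
        exact hkssperm.mem_iff
      have hksspw : (ss.map Prod.fst).Pairwise (· ≤ ·) := List.pairwise_map.mpr hssp
      have hofpw : (PySem.Set.ofList (ss.map Prod.fst)).Pairwise (· < ·) :=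
        pcs_pairwise_ofList _ hksspw
      have hcond : (PySem.List.pyGetD ss 0 (0, "")).1 = 0 ↔ 0 ∈ es.map Prod.fst := by
        cases hss : ss with
        | nil => exact absurd hss hssne
        | cons m t =>
          have hss' : PySem.List.sorted es (fun p => p.1) = m :: t := by rw [← hss_def]; exact hss
          have hm_es : m ∈ es := (PySem.List.mem_sorted es (fun p => p.1) false m).mp
            (by rw [show PySem.List.sorted es (fun p => p.1) false = m :: t from hss']; exact List.mem_cons_self)
          rw [PySem.List.pyGetD_zero_cons]
          constructor
          · intro hm
            rw [← hm]
            exact List.mem_map_of_mem hm_es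
          · intro hmem
            obtain ⟨r, hres, hr0⟩ := List.mem_map.mp hmem
            have hle : m.1 ≤ r.1 := PySem.List.key_head_sorted_le es (fun p => p.1) hss' r hres
            have hge : 0 ≤ m.1 := hnn m hm_es
            omega
      by_cases h0 : 0 ∈ es.map Prod.fst
      · -- a genuine 0 entry exists: no default insertion on either side
        rw [if_neg (not_not_intro (hcond.mpr h0))]
        have hcont : D.contains 0 = true :=
          (PySem.Dict.contains_iff_mem_keys D 0).mpr (by rw [hkeys]; exact (PySem.Set.mem_ofList _ _).mpr h0)
        rw [if_pos hcont]
        rw [pcs_canon_eq ss hssp]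
        have hcanon : pcsCanon ss = (PySem.Set.ofList (ss.map Prod.fst)).map
            (fun k => (k, pcsLastv es k)) := by
          unfold pcsCanon
          exact List.map_congr_left (fun k _ => by rw [pcs_lastv_sorted])
        refine (PySem.List.sorted_eq_of_perm_of_pairwise_lt D.items (pcsCanon ss) (fun p => p.1) ?_ ?_).symm
        · rw [hcanon, hitems]
          exact hofperm.map _
        · rw [hcanon]
          exact List.pairwise_map.mpr hofpw
      · -- no 0 entry: A prepends the default, B inserts it into the dict
        rw [if_pos (fun h => h0 (hcond.mp h))]
        have hcont : ¬(D.contains 0 = true) := by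
          rw [PySem.Dict.contains_iff_mem_keys, hkeys, PySem.Set.mem_ofList]
          exact h0
        rw [if_neg hcont]
        have hcontf : D.contains 0 = false := by
          cases hcc : D.contains 0
          · rfl
          · exact absurd hcc hcont
        have hitems2 : (D.insert 0 base).items = D.items ++ [(0, base)] :=
          PySem.Dict.items_insert_of_not_contains D base hcontf
        have h0ss : (0 : Int) ∉ ss.map Prod.fst := fun hmem => h0 (hkssperm.mem_iff.mp hmem)
        have hpwcons : ((0, base) :: ss).Pairwise (fun a b => a.1 ≤ b.1) := by
          rw [List.pairwise_cons]
          exact ⟨fun r hr => hnn r ((PySem.List.mem_sorted es (fun p => p.1) false r).mp hr), hssp⟩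
        rw [pcs_canon_eq _ hpwcons]
        have hfilter0 : ss.filter (fun p => p.1 == (0 : Int)) = [] := by
          rw [List.filter_eq_nil_iff]
          intro r hr
          simp only [beq_iff_eq]
          exact fun hr0 => h0ss (hr0 ▸ List.mem_map_of_mem hr)
        have hdisc : (PySem.Set.ofList (ss.map Prod.fst)).discard 0
            = PySem.Set.ofList (ss.map Prod.fst) := by
          rw [PySem.Set.discard, List.filter_eq_self]
          intro y hy
          have hy0 : y ≠ 0 := fun h => h0ss (h ▸ (PySem.Set.mem_ofList _ _).mp hy)
          simp [hy0]
        have hlv0 : pcsLastv ((0, base) :: ss) 0 = base := by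
          unfold pcsLastv
          rw [List.filter_cons, if_pos (by simp), hfilter0]
          rfl
        have hlvk : ∀ k : Int, k ≠ 0 → pcsLastv ((0, base) :: ss) k = pcsLastv ss k := by
          intro k hk0
          unfold pcsLastv
          rw [List.filter_cons, if_neg (by simpa using fun hh => hk0 hh.symm)]
        have hcanon : pcsCanon ((0, base) :: ss)
            = (0, base) :: (PySem.Set.ofList (ss.map Prod.fst)).map (fun k => (k, pcsLastv es k)) := by
          unfold pcsCanon
          rw [List.map_cons]
          dsimp only
          rw [PySem.Set.ofList_cons]
          rw [hdisc]
          rw [List.map_cons]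
          rw [hlv0]
          refine congrArg (List.cons ((0 : Int), base)) ?_
          apply List.map_congr_left
          intro k hk
          have hk0 : k ≠ 0 := by
            intro hkk
            exact h0ss (hkk ▸ ((PySem.Set.mem_ofList _ _).mp hk))
          rw [hlvk k hk0, pcs_lastv_sorted]
        rw [hcanon]
        refine (PySem.List.sorted_eq_of_perm_of_pairwise_lt ((D.insert 0 base).items)
          ((0, base) :: (PySem.Set.ofList (ss.map Prod.fst)).map (fun k => (k, pcsLastv es k)))
          (fun p => p.1) ?_ ?_).symm
        · rw [hitems2, hitems]
          refine List.Perm.trans ?_ (List.perm_append_singleton _ _).symm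
          exact List.Perm.cons _ (hofperm.map _)
        · rw [List.pairwise_cons]
          constructor
          · intro y hy
            obtain ⟨k, hk, rfl⟩ := List.mem_map.mp hy
            have hkmem : k ∈ ss.map Prod.fst := (PySem.Set.mem_ofList _ _).mp hk
            obtain ⟨r, hrss, rfl⟩ := List.mem_map.mp hkmem
            have h0r : 0 ≤ r.1 := hnn r ((PySem.List.mem_sorted es (fun p => p.1) false r).mp hrss)
            have hne : r.1 ≠ 0 := fun hh => h0ss (hh ▸ hkmem)
            show (0 : Int) < r.1
            omega
          · exact List.pairwise_map.mpr hofpw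

-- ===== VERDICT (by name: the statement is the Claim_ definition above) =====
theorem parse_curriculum_schedule_spec : Claim_equal_parse_curriculum_schedule := by
  intro value default_spec _
  unfold Spec_parse_curriculum_schedule
  exact pcs_main value default_spec
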